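-- pv_equiv track=rewrite | github.com/SiddharthShah30/puzzle-solver | zip_solver/solver.py | _collect_pairs
-- ===== SOURCE A (Python) =====
-- from typing import Deque, Dict, List, Optional, Set, Tuple
--
-- Coordinate = Tuple[int, int]
--
-- def _collect_pairs(clues: List[List[int]]) -> Dict[int, List[Coordinate]]:
--     pairs: Dict[int, List[Coordinate]] = {}
--     for r, row in enumerate(clues):
--         for c, value in enumerate(row):
--             if value == 0:
--                 continue
--             pairs.setdefault(value, []).append((r, c))
--     return pairs
-- ===== SOURCE B (Python) =====
-- from typing import Dict, List, Tuple
--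
-- Coordinate = Tuple[int, int]
--
-- def _collect_pairs(clues: List[List[int]]) -> Dict[int, List[Coordinate]]:
--     cells = [(v, (r, c)) for r, row in enumerate(clues)
--                          for c, v in enumerate(row) if v != 0]
--     keys = list(dict.fromkeys(v for v, _ in cells))
--     return {k: [rc for v, rc in cells if v == k] for k in keys}
-- ===== Notes on version B (the rewrite author's own statement) =====
-- stated objective: alternative
-- what changed: Replaces the streaming setdefault-append dict pass with a flatten-then-group decomposition: build a flat list of nonzero (value,(r,c)) cells, take first-occurrence-deduplicated keys via dict.fromkeys, and map each key to a per-key filter of the flat list.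
import Mathlib
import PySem

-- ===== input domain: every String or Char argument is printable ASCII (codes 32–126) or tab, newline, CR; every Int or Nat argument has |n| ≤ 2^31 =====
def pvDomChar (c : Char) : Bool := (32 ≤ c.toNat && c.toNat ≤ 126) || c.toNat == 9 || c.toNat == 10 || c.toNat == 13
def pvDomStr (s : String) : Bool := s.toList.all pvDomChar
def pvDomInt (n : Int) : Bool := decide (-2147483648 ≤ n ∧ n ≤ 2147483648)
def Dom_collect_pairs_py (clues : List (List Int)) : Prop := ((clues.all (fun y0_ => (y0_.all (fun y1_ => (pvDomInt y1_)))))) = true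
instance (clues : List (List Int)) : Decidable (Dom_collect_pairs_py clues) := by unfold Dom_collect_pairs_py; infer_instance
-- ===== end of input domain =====

-- B replaces A's streaming setdefault-append dict pass by a flatten-then-group decomposition (alternative structure, same results).

-- ===== PORT A =====
-- pairs.setdefault(value, []).append((r, c))  ==  modify value [] (· ++ [(r, c)])  (exact: in-place append on the defaulted entry)
def collect_pairs_py (clues : List (List Int)) : List (Int × List (Int × Int)) :=
  ((PySem.List.enumerate clues).foldl (fun d q =>
      (PySem.List.enumerate q.2).foldl (fun d p =>
        if p.2 == 0 then d else d.modify p.2 [] (· ++ [(q.1, p.1)])) d)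
    PySem.Dict.empty).items

-- ===== PORT B =====
def collect_pairs_py_alt (clues : List (List Int)) : List (Int × List (Int × Int)) :=
  let cells := (PySem.List.enumerate clues).flatMap (fun q =>
    ((PySem.List.enumerate q.2).filter (fun p => p.2 != 0)).map (fun p => (p.2, (q.1, p.1))))
  let keys := PySem.List.dedup (cells.map (·.1))
  keys.map (fun k => (k, (cells.filter (fun p => p.1 == k)).map (·.2)))

-- ===== PRECONDITION & SPEC =====
def Spec_collect_pairs_py (clues : List (List Int)) (out : List (Int × List (Int × Int))) : Prop := out = collect_pairs_py_alt clues
instance (clues : List (List Int)) (out : List (Int × List (Int × Int))) : Decidable (Spec_collect_pairs_py clues out) := by unfold Spec_collect_pairs_py; infer_instance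

-- ===== CLAIM (what is proved, stated in full; the proofs are below) =====
def Claim_equal_collect_pairs_py : Prop := ∀ (clues : List (List Int)), Dom_collect_pairs_py clues → Spec_collect_pairs_py clues (collect_pairs_py clues)

-- ===== LEMMAS AND PROOFS =====

-- A's inner row loop equals folding the grouping step over that row's flat nonzero cells.
theorem pv_inner (r : Int) (l : List (Int × Int)) (d : PySem.Dict Int (List (Int × Int))) :
    l.foldl (fun d p => if p.2 == 0 then d else d.modify p.2 [] (· ++ [(r, p.1)])) d
    = ((l.filter (fun p => p.2 != 0)).map (fun p => (p.2, (r, p.1)))).foldl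
        (fun d q => d.modify q.1 [] (· ++ [q.2])) d := by
  induction l generalizing d with
  | nil => rfl
  | cons x xs ih =>
      by_cases h : x.2 = 0
      · simpa [h] using ih (d := d)
      · simpa [h] using ih (d := d.modify x.2 [] (· ++ [(r, x.1)]))

-- A's nested loops equal folding the grouping step over the flat cell list.
theorem pv_flat (rows : List (Int × List Int)) (d : PySem.Dict Int (List (Int × Int))) :
    rows.foldl (fun d q =>
        (PySem.List.enumerate q.2).foldl (fun d p =>
          if p.2 == 0 then d else d.modify p.2 [] (· ++ [(q.1, p.1)])) d) d
    = (rows.flatMap (fun q =>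
        ((PySem.List.enumerate q.2).filter (fun p => p.2 != 0)).map (fun p => (p.2, (q.1, p.1))))).foldl
        (fun d q => d.modify q.1 [] (· ++ [q.2])) d := by
  induction rows generalizing d with
  | nil => rfl
  | cons x xs ih =>
      rw [List.foldl_cons, List.flatMap_cons, List.foldl_append, pv_inner]
      exact ih _

-- ===== VERDICT (by name: the statement is the Claim_ definition above) =====
theorem collect_pairs_py_spec : Claim_equal_collect_pairs_py := by
  intro clues _
  unfold Spec_collect_pairs_py collect_pairs_py collect_pairs_py_alt
  rw [pv_flat]
  set cells := (PySem.List.enumerate clues).flatMap (fun q =>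
    ((PySem.List.enumerate q.2).filter (fun p => p.2 != 0)).map (fun p => (p.2, (q.1, p.1))))
  have hnd : (cells.foldl (fun d q => d.modify q.1 [] (· ++ [q.2])) PySem.Dict.empty).keys.Nodup := by
    exact PySem.Dict.nodup_keys_foldl_modify_key cells Prod.fst [] (fun _ q => (· ++ [q.2])) _ (by simp)
  rw [PySem.Dict.items_eq_map_keys _ hnd []]
  have hkeys : (cells.foldl (fun d q => d.modify q.1 [] (· ++ [q.2])) PySem.Dict.empty).keys
      = PySem.List.dedup (cells.map (·.1)) := by
    rw [PySem.Dict.keys_foldl_modify_key]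
    simp [PySem.List.dedup_eq_ofList, PySem.Set.update_nil_left]
  rw [hkeys]
  refine List.map_congr_left ?_
  intro k _
  rw [PySem.Dict.getD_foldl_modify_append]
  simp
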